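-- pv_equiv track=rewrite | github.com/sakanaowo/RAG-bidding | src/preprocessing/law_preprocessing/cleaners/legal_cleaner.py | _aggressive_clean
-- ===== SOURCE A (Python) =====
-- def _aggressive_clean(text: str) -> str:
--     """Aggressive cleaning (có thể remove useful content)"""
--
--     # Remove very short lines (likely artifacts)
--     lines = text.split("\n")
--     lines = [line for line in lines if len(line.strip()) > 5 or not line.strip()]
--     text = "\n".join(lines)
--
--     # Remove duplicate lines
--     lines = text.split("\n")
--     unique_lines = []
--     prev_line = None
--
--     for line in lines:
--         if line != prev_line:
--             unique_lines.append(line)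
--         prev_line = line
--
--     text = "\n".join(unique_lines)
--
--     return text
-- ===== SOURCE B (Python) =====
-- def _aggressive_clean(text: str) -> str:
--     """Single fused pass: filter short lines and drop consecutive duplicates together."""
--     out = []
--     prev = None
--     for line in text.split("\n"):
--         s = line.strip()
--         if len(s) > 5 or not s:
--             if line != prev:
--                 out.append(line)
--             prev = line
--     return "\n".join(out)
-- ===== Notes on version B (the rewrite author's own statement) =====
-- stated objective: simpler
-- what changed: B fuses A's three passes (filter, re-join+re-split, consecutive-dedup) into one loop over the split lines that filters and deduplicates with a prev tracker updated only on filter-surviving lines.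
import Mathlib
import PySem

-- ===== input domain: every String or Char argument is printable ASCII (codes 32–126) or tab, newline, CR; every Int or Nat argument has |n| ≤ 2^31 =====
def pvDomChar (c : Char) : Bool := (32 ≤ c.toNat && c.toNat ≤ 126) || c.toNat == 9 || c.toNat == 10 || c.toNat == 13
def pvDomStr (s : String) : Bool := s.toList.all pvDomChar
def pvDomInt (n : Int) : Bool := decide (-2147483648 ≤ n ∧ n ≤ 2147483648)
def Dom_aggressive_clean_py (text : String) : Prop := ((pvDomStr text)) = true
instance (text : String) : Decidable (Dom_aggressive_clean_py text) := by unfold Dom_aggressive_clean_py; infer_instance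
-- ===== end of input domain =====

-- B fuses A's three passes (filter, re-join+re-split, consecutive dedup) into one loop; objective: simpler.

-- ===== PORT A =====
def aggressive_clean_py (text : String) : String :=
  -- lines = text.split("\n"); lines = [line for line in lines if …]; text = "\n".join(lines)
  let lines := PySem.Chars.splitOn text.toList ['\n']
  -- keep if len(line.strip()) > 5 or not line.strip()
  let lines := lines.filter (fun line =>
    decide (5 < (PySem.Chars.strip line).length) || (PySem.Chars.strip line).isEmpty)
  let text1 := PySem.Chars.join ['\n'] lines
  -- lines = text.split("\n"); loop appending when line != prev_line
  let lines2 := PySem.Chars.splitOn text1 ['\n']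
  let st := lines2.foldl
    (fun (st : List (List Char) × Option (List Char)) line =>
      (if some line = st.2 then st.1 else st.1 ++ [line], some line))
    ([], none)
  String.ofList (PySem.Chars.join ['\n'] st.1)

-- ===== PORT B =====
def aggressive_clean_py_alt (text : String) : String :=
  let st := (PySem.Chars.splitOn text.toList ['\n']).foldl
    (fun (st : List (List Char) × Option (List Char)) line =>
      let st' := PySem.Chars.strip line
      if 5 < st'.length ∨ st' = [] then
        (if some line = st.2 then st.1 else st.1 ++ [line], some line)
      else st)
    ([], none)
  String.ofList (PySem.Chars.join ['\n'] st.1)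

-- ===== PRECONDITION & SPEC =====
def Spec_aggressive_clean_py (text : String) (out : String) : Prop := out = aggressive_clean_py_alt text
instance (text : String) (out : String) : Decidable (Spec_aggressive_clean_py text out) := by unfold Spec_aggressive_clean_py; infer_instance

-- ===== CLAIM (what is proved, stated in full; the proofs are below) =====
def Claim_equal_aggressive_clean_py : Prop := ∀ (text : String), Dom_aggressive_clean_py text → Spec_aggressive_clean_py text (aggressive_clean_py text)

-- ===== LEMMAS AND PROOFS =====

-- simple structural model of s.split("\n")
def pvSplitNL : List Char → List (List Char)
  | [] => [[]]
  | c :: rest =>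
    if c = '\n' then [] :: pvSplitNL rest
    else match pvSplitNL rest with
      | [] => [[c]]
      | p :: ps => (c :: p) :: ps

def pvMapFirst (f : List Char → List Char) : List (List Char) → List (List Char)
  | [] => []
  | p :: ps => f p :: ps

theorem pvSplitNL_ne_nil (s : List Char) : pvSplitNL s ≠ [] := by
  cases s with
  | nil => simp [pvSplitNL]
  | cons c rest =>
    simp only [pvSplitNL]
    split <;> [skip; split] <;> simp

theorem pvGo_spec : ∀ (fuel : Nat) (l cur : List Char) (acc : List (List Char)),
    l.length ≤ fuel →
    PySem.Chars.splitOn.go ['\n'] fuel l cur acc =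
      acc.reverse ++ pvMapFirst (cur.reverse ++ ·) (pvSplitNL l) := by
  intro fuel
  induction fuel with
  | zero =>
    intro l cur acc h
    have : l = [] := List.eq_nil_of_length_eq_zero (Nat.le_zero.mp h)
    subst this
    simp [PySem.Chars.splitOn.go, pvSplitNL, pvMapFirst]
  | succ n ih =>
    intro l cur acc h
    cases l with
    | nil => simp [PySem.Chars.splitOn.go, pvSplitNL, pvMapFirst]
    | cons c rest =>
      by_cases hc : c = '\n'
      · subst hc
        have hpre : List.isPrefixOf ['\n'] ('\n' :: rest) = true := by
          simp [List.isPrefixOf]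
        rw [PySem.Chars.splitOn.go]
        simp only [hpre, if_pos, List.length_cons, List.drop_succ_cons, List.length_nil,
          List.drop_zero]
        rw [ih rest [] (cur.reverse :: acc) (by simpa using h)]
        simp [pvSplitNL]
        cases hs : pvSplitNL rest with
        | nil => exact absurd hs (pvSplitNL_ne_nil rest)
        | cons p ps => simp [pvMapFirst]
      · have hpre : List.isPrefixOf ['\n'] (c :: rest) = false := by
          simp [List.isPrefixOf]
          intro h'; exact absurd h'.symm hc
        rw [PySem.Chars.splitOn.go]
        simp only [hpre, Bool.false_eq_true, if_false]
        rw [ih rest (c :: cur) acc (by simpa using Nat.le_of_succ_le_succ (by simpa using h))]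
        simp only [pvSplitNL, hc, if_false]
        cases hs : pvSplitNL rest with
        | nil => exact absurd hs (pvSplitNL_ne_nil rest)
        | cons p ps => simp [pvMapFirst]

theorem pvSplitOn_eq (s : List Char) :
    PySem.Chars.splitOn s ['\n'] = pvSplitNL s := by
  rw [PySem.Chars.splitOn, pvGo_spec (s.length + 1) s [] [] (Nat.le_succ _)]
  cases hs : pvSplitNL s with
  | nil => exact absurd hs (pvSplitNL_ne_nil s)
  | cons p ps => simp [pvMapFirst]

theorem pvSplitNL_append (a t : List Char) (ha : '\n' ∉ a) :
    pvSplitNL (a ++ t) = pvMapFirst (a ++ ·) (pvSplitNL t) := by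
  induction a with
  | nil =>
    cases hs : pvSplitNL t with
    | nil => exact absurd hs (pvSplitNL_ne_nil t)
    | cons p ps => simp [hs, pvMapFirst]
  | cons c rest ih =>
    have hc : c ≠ '\n' := fun h => ha (by simp [h])
    have hrest : '\n' ∉ rest := fun h => ha (by simp [h])
    simp only [List.cons_append, pvSplitNL, hc, if_false, ih hrest]
    cases hs : pvSplitNL t with
    | nil => exact absurd hs (pvSplitNL_ne_nil t)
    | cons p ps => simp [pvMapFirst]

theorem pvIntercalate_cons_cons (a b : List Char) (rs : List (List Char)) :
    List.intercalate ['\n'] (a :: b :: rs) = a ++ '\n' :: List.intercalate ['\n'] (b :: rs) := by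
  simp [List.intercalate, List.intersperse]

theorem pvSplitNL_intercalate : ∀ (ls : List (List Char)), ls ≠ [] →
    (∀ p ∈ ls, '\n' ∉ p) →
    pvSplitNL (List.intercalate ['\n'] ls) = ls := by
  intro ls
  induction ls with
  | nil => intro h; exact absurd rfl h
  | cons a rest ih =>
    intro _ hmem
    have ha : '\n' ∉ a := hmem a (by simp)
    cases rest with
    | nil =>
      have h1 : List.intercalate ['\n'] [a] = a := by simp [List.intercalate]
      have h2 := pvSplitNL_append a [] ha
      rw [h1]
      simpa [pvSplitNL, pvMapFirst] using h2
    | cons b rs =>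
      rw [pvIntercalate_cons_cons]
      rw [pvSplitNL_append a _ ha]
      have : pvSplitNL ('\n' :: List.intercalate ['\n'] (b :: rs))
          = [] :: pvSplitNL (List.intercalate ['\n'] (b :: rs)) := by
        simp [pvSplitNL]
      rw [this, ih (by simp) (fun p hp => hmem p (by simp [hp]))]
      simp [pvMapFirst]

theorem pvMem_splitNL (s : List Char) : ∀ p ∈ pvSplitNL s, '\n' ∉ p := by
  induction s with
  | nil => simp [pvSplitNL]
  | cons c rest ih =>
    by_cases hc : c = '\n'
    · subst hc; simpa [pvSplitNL] using ih
    · simp only [pvSplitNL, hc, if_false]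
      cases hs : pvSplitNL rest with
      | nil => exact absurd hs (pvSplitNL_ne_nil rest)
      | cons p ps =>
        intro q hq
        rw [hs] at ih
        rcases List.mem_cons.mp hq with h | h
        · subst h
          intro hmem
          rcases List.mem_cons.mp hmem with h | h
          · exact hc h.symm
          · exact ih p (by simp) h
        · exact ih q (by simp [h])

theorem pvFused_eq : ∀ (ls : List (List Char)) (acc : List (List Char)) (p : Option (List Char)),
    ls.foldl
      (fun (st : List (List Char) × Option (List Char)) line =>
        let st' := PySem.Chars.strip line
        if 5 < st'.length ∨ st' = [] then
          (if some line = st.2 then st.1 else st.1 ++ [line], some line)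
        else st) (acc, p)
    = (ls.filter (fun line =>
        decide (5 < (PySem.Chars.strip line).length) || (PySem.Chars.strip line).isEmpty)).foldl
      (fun (st : List (List Char) × Option (List Char)) line =>
        (if some line = st.2 then st.1 else st.1 ++ [line], some line)) (acc, p) := by
  intro ls
  induction ls with
  | nil => intro acc p; rfl
  | cons a rest ih =>
    intro acc p
    by_cases ha : 5 < (PySem.Chars.strip a).length ∨ PySem.Chars.strip a = []
    · have hb : (decide (5 < (PySem.Chars.strip a).length) || (PySem.Chars.strip a).isEmpty) = true := by
        rcases ha with h | h <;> simp [h]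
      simp only [List.filter_cons, hb, if_pos ha, List.foldl_cons, ih]
      simp
    · have hb : (decide (5 < (PySem.Chars.strip a).length) || (PySem.Chars.strip a).isEmpty) = false := by
        rw [not_or] at ha
        simp [ha.1, ha.2]
      simp only [List.filter_cons, hb, if_neg ha, List.foldl_cons, ih]
      simp

-- ===== VERDICT (by name: the statement is the Claim_ definition above) =====
theorem aggressive_clean_py_spec : Claim_equal_aggressive_clean_py := by
  intro text _
  unfold Spec_aggressive_clean_py aggressive_clean_py aggressive_clean_py_alt
  simp only [pvSplitOn_eq, pvFused_eq]
  set fl := (pvSplitNL text.toList).filter (fun line =>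
    decide (5 < (PySem.Chars.strip line).length) || (PySem.Chars.strip line).isEmpty) with hfl
  cases hc : fl with
  | nil => rfl
  | cons f fs =>
    have hmem : ∀ p ∈ f :: fs, '\n' ∉ p := by
      intro p hp
      have hpfl : p ∈ fl := by rw [hc]; exact hp
      exact pvMem_splitNL text.toList p (List.mem_of_mem_filter (hfl ▸ hpfl))
    rw [show PySem.Chars.join ['\n'] (f :: fs) = List.intercalate ['\n'] (f :: fs) from rfl,
      pvSplitNL_intercalate _ (by simp) hmem]
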